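-- pv_equiv track=rewrite | github.com/gbordes77/Manalytics | src/python/ml/recommendation_engine.py | _analyze_play_style_tags
-- ===== SOURCE A (Python) =====
-- from typing import Dict, List, Optional, Tuple, Any
-- from collections import defaultdict, Counter
--
-- def _analyze_play_style_tags(match_history: List[Dict]) -> List[str]:
--     """Analyser les tags de style de jeu"""
--     tags = []
--
--     # Analyser les archétypes joués
--     archetype_counts = Counter()
--     for match in match_history:
--         archetype = match.get('deck', {}).get('archetype', '')
--         archetype_counts[archetype] += 1
--
--     # Déterminer les tags basés sur les archétypes
--     for archetype, count in archetype_counts.most_common():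
--         archetype_lower = archetype.lower()
--
--         if 'aggro' in archetype_lower:
--             tags.append('aggressive')
--         elif 'control' in archetype_lower:
--             tags.append('controlling')
--         elif 'combo' in archetype_lower:
--             tags.append('combo_player')
--         elif 'midrange' in archetype_lower:
--             tags.append('balanced')
--
--     return list(set(tags))
-- ===== SOURCE B (Python) =====
-- def _analyze_play_style_tags(match_history):
--     """One pass: maintain the dedup set of tags directly; no Counter, no second pass."""
--     tags = set()
--     for match in match_history:
--         archetype = match.get('deck', {}).get('archetype', '').lower()
--         if 'aggro' in archetype:
--             tags.add('aggressive')
--         elif 'control' in archetype: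
--             tags.add('controlling')
--         elif 'combo' in archetype:
--             tags.add('combo_player')
--         elif 'midrange' in archetype:
--             tags.add('balanced')
--     return list(tags)
-- ===== Notes on version B (the rewrite author's own statement) =====
-- stated objective: simpler
-- what changed: Drops the Counter and its most_common second pass: one scan over match_history maintains only the dedup set of tags.
import Mathlib
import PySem

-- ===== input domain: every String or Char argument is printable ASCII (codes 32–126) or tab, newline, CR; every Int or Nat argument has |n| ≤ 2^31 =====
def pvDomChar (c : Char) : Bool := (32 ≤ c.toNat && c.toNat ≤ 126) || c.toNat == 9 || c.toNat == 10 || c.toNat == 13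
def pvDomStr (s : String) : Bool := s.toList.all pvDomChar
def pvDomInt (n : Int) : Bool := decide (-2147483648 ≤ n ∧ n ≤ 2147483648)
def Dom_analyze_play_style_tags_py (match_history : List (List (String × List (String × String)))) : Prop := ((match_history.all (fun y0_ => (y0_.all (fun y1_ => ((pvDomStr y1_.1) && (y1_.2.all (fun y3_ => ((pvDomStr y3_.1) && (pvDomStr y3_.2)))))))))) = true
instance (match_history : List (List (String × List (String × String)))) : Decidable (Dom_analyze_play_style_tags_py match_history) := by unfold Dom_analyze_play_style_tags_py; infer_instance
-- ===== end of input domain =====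

-- B replaces A's Counter-then-most_common double pass by a single scan maintaining only the dedup set (objective: simpler).
-- Both Pythons return list(set(...)); equality of the returned LISTS is proved on Pre_ (at most one distinct tag), where order is trivial.

-- shared helper: match.get('deck', {}).get('archetype', '')  (the same expression in both sources)
def pvArchetype (m : List (String × List (String × String))) : String :=
  PySem.Dict.getD (PySem.Dict.mk (PySem.Dict.getD (PySem.Dict.mk m) "deck" [])) "archetype" ""

-- ===== PORT A =====
def analyze_play_style_tags_py (match_history : List (List (String × List (String × String)))) : List String :=
  let archetype_counts : PySem.Dict String Int :=
    match_history.foldl (fun d m => PySem.Dict.modify d (pvArchetype m) 0 (· + 1)) PySem.Dict.empty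
  -- Counter.most_common() = sorted(items, key=count, reverse=True) (stable)
  let tags : List String :=
    (PySem.List.sorted archetype_counts.items (fun kv => kv.2) true).foldl
      (fun tags kv =>
        let archetype_lower := PySem.Str.lower kv.1
        if PySem.Str.isIn "aggro" archetype_lower then tags ++ ["aggressive"]
        else if PySem.Str.isIn "control" archetype_lower then tags ++ ["controlling"]
        else if PySem.Str.isIn "combo" archetype_lower then tags ++ ["combo_player"]
        else if PySem.Str.isIn "midrange" archetype_lower then tags ++ ["balanced"]
        else tags) []
  PySem.Set.ofList tags   -- list(set(tags))

-- ===== PORT B =====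
def analyze_play_style_tags_py_alt (match_history : List (List (String × List (String × String)))) : List String :=
  match_history.foldl
    (fun tags m =>
      let archetype := PySem.Str.lower (pvArchetype m)
      if PySem.Str.isIn "aggro" archetype then PySem.Set.add tags "aggressive"
      else if PySem.Str.isIn "control" archetype then PySem.Set.add tags "controlling"
      else if PySem.Str.isIn "combo" archetype then PySem.Set.add tags "combo_player"
      else if PySem.Str.isIn "midrange" archetype then PySem.Set.add tags "balanced"
      else tags)
    PySem.Set.empty

-- ===== PRECONDITION & SPEC =====
-- the tag a single match contributes (none = no keyword in its lowercased archetype)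
def pvTag (m : List (String × List (String × String))) : Option String :=
  let al := PySem.Str.lower (pvArchetype m)
  if PySem.Str.isIn "aggro" al then some "aggressive"
  else if PySem.Str.isIn "control" al then some "controlling"
  else if PySem.Str.isIn "combo" al then some "combo_player"
  else if PySem.Str.isIn "midrange" al then some "balanced"
  else none

-- Pre_ excludes histories whose archetypes yield two or more DISTINCT style tags: there both programs return list(set(tags)),
-- whose element order is Python's accidental hash order (an unspecified corner; the two ports realise it in two different orders).
def Pre_analyze_play_style_tags_py (match_history : List (List (String × List (String × String)))) : Prop :=
  ∀ m ∈ match_history, ∀ m' ∈ match_history, pvTag m = pvTag m' ∨ pvTag m = none ∨ pvTag m' = none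
instance (match_history : List (List (String × List (String × String)))) : Decidable (Pre_analyze_play_style_tags_py match_history) := by unfold Pre_analyze_play_style_tags_py; infer_instance

def pvWitness_analyze_play_style_tags_py : (List (List (String × List (String × String)))) :=
  [[("deck", [("archetype", "Mono Aggro")])], [("date", [])], [("deck", [("archetype", "aggro burn")])]]

def Spec_analyze_play_style_tags_py (match_history : List (List (String × List (String × String)))) (out : List String) : Prop := out = analyze_play_style_tags_py_alt match_history
instance (match_history : List (List (String × List (String × String)))) (out : List String) : Decidable (Spec_analyze_play_style_tags_py match_history out) := by unfold Spec_analyze_play_style_tags_py; infer_instance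

-- ===== CLAIM (what is proved, stated in full; the proofs are below) =====
def Claim_equal_analyze_play_style_tags_py : Prop := ∀ (match_history : List (List (String × List (String × String)))), Dom_analyze_play_style_tags_py match_history → Pre_analyze_play_style_tags_py match_history → Spec_analyze_play_style_tags_py match_history (analyze_play_style_tags_py match_history)

-- ===== LEMMAS AND PROOFS =====

-- A's inner loop appends exactly the tag of the key (as an Option.toList)
lemma tagsA_flatMap (l : List (String × Int)) (acc : List String) :
    l.foldl
      (fun tags kv =>
        let archetype_lower := PySem.Str.lower kv.1
        if PySem.Str.isIn "aggro" archetype_lower then tags ++ ["aggressive"]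
        else if PySem.Str.isIn "control" archetype_lower then tags ++ ["controlling"]
        else if PySem.Str.isIn "combo" archetype_lower then tags ++ ["combo_player"]
        else if PySem.Str.isIn "midrange" archetype_lower then tags ++ ["balanced"]
        else tags) acc
    = acc ++ l.flatMap (fun kv =>
        (let al := PySem.Str.lower kv.1
         if PySem.Str.isIn "aggro" al then some "aggressive"
         else if PySem.Str.isIn "control" al then some "controlling"
         else if PySem.Str.isIn "combo" al then some "combo_player"
         else if PySem.Str.isIn "midrange" al then some "balanced"
         else none : Option String).toList) := by
  induction l generalizing acc with
  | nil => simp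
  | cons kv rest ih =>
      simp only [List.foldl_cons, List.flatMap_cons, ih]
      split_ifs <;> simp

lemma memA (h : List (List (String × List (String × String)))) (t : String) :
    t ∈ analyze_play_style_tags_py h ↔ ∃ m ∈ h, pvTag m = some t := by
  unfold analyze_play_style_tags_py
  dsimp only
  rw [tagsA_flatMap]
  simp only [PySem.Set.mem_ofList, List.nil_append, List.mem_flatMap, Option.mem_toList]
  constructor
  · rintro ⟨kv, hkv, htag⟩
    have hk : kv.1 ∈ (h.foldl (fun d m => PySem.Dict.modify d (pvArchetype m) 0 (· + 1))
        (PySem.Dict.empty : PySem.Dict String Int)).keys := by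
      have := (PySem.List.mem_sorted _ _ _ _).mp hkv
      simpa [PySem.Dict.keys] using List.mem_map_of_mem (f := Prod.fst) this
    rw [PySem.Dict.keys_foldl_modify_key] at hk
    have hk' : kv.1 ∈ h.map pvArchetype := by
      simpa [PySem.Set.mem_update, PySem.Dict.empty, PySem.Dict.keys] using hk
    obtain ⟨m, hm, hme⟩ := List.mem_map.mp hk'
    exact ⟨m, hm, by simpa [pvTag, hme] using htag⟩
  · rintro ⟨m, hm, htag⟩
    have hk : pvArchetype m ∈ (h.foldl (fun d m => PySem.Dict.modify d (pvArchetype m) 0 (· + 1))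
        (PySem.Dict.empty : PySem.Dict String Int)).keys := by
      rw [PySem.Dict.keys_foldl_modify_key]
      simp only [PySem.Dict.empty, PySem.Dict.keys, PySem.Set.mem_update, List.mem_map,
        List.map_nil, List.not_mem_nil, false_or]
      exact ⟨m, hm, rfl⟩
    simp only [PySem.Dict.keys, List.mem_map] at hk
    obtain ⟨kv, hkv, hke⟩ := hk
    refine ⟨kv, (PySem.List.mem_sorted _ _ _ _).mpr hkv, ?_⟩
    simpa [pvTag, hke] using htag

lemma memB_aux (h : List (List (String × List (String × String)))) (s : List String) (t : String) :
    t ∈ h.foldl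
      (fun tags m =>
        let archetype := PySem.Str.lower (pvArchetype m)
        if PySem.Str.isIn "aggro" archetype then PySem.Set.add tags "aggressive"
        else if PySem.Str.isIn "control" archetype then PySem.Set.add tags "controlling"
        else if PySem.Str.isIn "combo" archetype then PySem.Set.add tags "combo_player"
        else if PySem.Str.isIn "midrange" archetype then PySem.Set.add tags "balanced"
        else tags) s
    ↔ t ∈ s ∨ ∃ m ∈ h, pvTag m = some t := by
  induction h generalizing s with
  | nil => simp
  | cons m rest ih =>
      simp only [List.foldl_cons, ih, List.mem_cons]
      have hstep : (t ∈ (let archetype := PySem.Str.lower (pvArchetype m)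
          if PySem.Str.isIn "aggro" archetype then PySem.Set.add s "aggressive"
          else if PySem.Str.isIn "control" archetype then PySem.Set.add s "controlling"
          else if PySem.Str.isIn "combo" archetype then PySem.Set.add s "combo_player"
          else if PySem.Str.isIn "midrange" archetype then PySem.Set.add s "balanced"
          else s)) ↔ t ∈ s ∨ pvTag m = some t := by
        simp only [pvTag]
        split_ifs <;> simp [PySem.Set.mem_add, eq_comm]
      rw [hstep]
      constructor
      · rintro (h1 | ⟨m', hm', ht⟩)
        · rcases h1 with h1 | h1
          · exact Or.inl h1
          · exact Or.inr ⟨m, by simp, h1⟩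
        · exact Or.inr ⟨m', by simp [hm'], ht⟩
      · rintro (h1 | ⟨m', hm', ht⟩)
        · exact Or.inl (Or.inl h1)
        · rcases hm' with rfl | hm'
          · exact Or.inl (Or.inr ht)
          · exact Or.inr ⟨m', hm', ht⟩

lemma memB (h : List (List (String × List (String × String)))) (t : String) :
    t ∈ analyze_play_style_tags_py_alt h ↔ ∃ m ∈ h, pvTag m = some t := by
  unfold analyze_play_style_tags_py_alt
  rw [memB_aux]
  simp [PySem.Set.empty]

lemma nodupB_aux (h : List (List (String × List (String × String)))) (s : List String)
    (hs : s.Nodup) :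
    (h.foldl
      (fun tags m =>
        let archetype := PySem.Str.lower (pvArchetype m)
        if PySem.Str.isIn "aggro" archetype then PySem.Set.add tags "aggressive"
        else if PySem.Str.isIn "control" archetype then PySem.Set.add tags "controlling"
        else if PySem.Str.isIn "combo" archetype then PySem.Set.add tags "combo_player"
        else if PySem.Str.isIn "midrange" archetype then PySem.Set.add tags "balanced"
        else tags) s).Nodup := by
  induction h generalizing s with
  | nil => simpa
  | cons m rest ih =>
      simp only [List.foldl_cons]
      apply ih
      split_ifs <;> first | exact PySem.Set.nodup_add _ _ hs | exact hs

-- two Nodup lists with the same members, all of which coincide, are equal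
lemma nodup_sub_singleton (l1 l2 : List String) (h1 : l1.Nodup) (h2 : l2.Nodup)
    (hmem : ∀ x, x ∈ l1 ↔ x ∈ l2) (hone : ∀ x ∈ l1, ∀ y ∈ l1, x = y) : l1 = l2 := by
  cases l1 with
  | nil =>
      cases l2 with
      | nil => rfl
      | cons b t => exact absurd ((hmem b).mpr (by simp)) (by simp)
  | cons a t =>
      have ht : t = [] := by
        cases t with
        | nil => rfl
        | cons c u =>
            have : a = c := hone a (by simp) c (by simp)
            simp [this] at h1
      subst ht
      cases l2 with
      | nil => exact absurd ((hmem a).mp (by simp)) (by simp)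
      | cons b u =>
          have hab : a = b := by
            have hb : b ∈ [a] := (hmem b).mpr (by simp)
            have : b = a := by simpa using hb
            exact this.symm
      -- every member of u equals b, but u is Nodup with b ∉ u, so u = []
          have hu : u = [] := by
            cases u with
            | nil => rfl
            | cons c v =>
                have hc : c ∈ [a] := (hmem c).mpr (by simp)
                have : c = a := by simpa using hc
                simp [hab ▸ this] at h2
          simp [hab, hu]

-- ===== VERDICT (by name: the statement is the Claim_ definition above) =====
theorem analyze_play_style_tags_py_spec : Claim_equal_analyze_play_style_tags_py := by
  intro h _ hpre
  unfold Spec_analyze_play_style_tags_py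
  apply nodup_sub_singleton
  · exact PySem.Set.nodup_ofList _
  · exact nodupB_aux h [] (by simp)
  · intro x
    rw [memA, memB]
  · intro x hx y hy
    obtain ⟨m, hm, hxm⟩ := (memA h x).mp hx
    obtain ⟨m', hm', hym⟩ := (memA h y).mp hy
    rcases hpre m hm m' hm' with heq | hn | hn
    · rw [hxm, hym] at heq; exact Option.some_injective _ heq
    · simp [hn] at hxm
    · simp [hn] at hym
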